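-- pv_equiv track=rewrite | github.com/girving/aks | scripts/rvw/mosek_debug.py | monomial_list_5
-- ===== SOURCE A (Python) =====
-- def monomial_list_5(max_deg):
--     monos = []
--     for d in range(max_deg + 1):
--         for a in range(d + 1):
--             for c in range(d - a + 1):
--                 for i in range(d - a - c + 1):
--                     for j in range(d - a - c - i + 1):
--                         k = d - a - c - i - j
--                         monos.append((a, c, i, j, k))
--     return monos
-- ===== SOURCE B (Python) =====
-- def comps(nvars, total):
--     # all tuples of `nvars` nonnegative ints summing exactly to `total`,
--     # first coordinate ascending
--     if nvars == 1:
--         return [(total,)]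
--     out = []
--     for first in range(total + 1):
--         for rest in comps(nvars - 1, total - first):
--             out.append((first,) + rest)
--     return out
--
-- def monomial_list_5(max_deg):
--     monos = []
--     for d in range(max_deg + 1):
--         monos.extend(comps(5, d))
--     return monos
-- ===== Notes on version B (the rewrite author's own statement) =====
-- stated objective: simpler
-- what changed: Replaces the five hand-unrolled nested loops by a recursive helper comps(nvars, total) enumerating all nvars-tuples of nonnegative ints with the given sum, producing the identical list order.
import Mathlib
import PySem

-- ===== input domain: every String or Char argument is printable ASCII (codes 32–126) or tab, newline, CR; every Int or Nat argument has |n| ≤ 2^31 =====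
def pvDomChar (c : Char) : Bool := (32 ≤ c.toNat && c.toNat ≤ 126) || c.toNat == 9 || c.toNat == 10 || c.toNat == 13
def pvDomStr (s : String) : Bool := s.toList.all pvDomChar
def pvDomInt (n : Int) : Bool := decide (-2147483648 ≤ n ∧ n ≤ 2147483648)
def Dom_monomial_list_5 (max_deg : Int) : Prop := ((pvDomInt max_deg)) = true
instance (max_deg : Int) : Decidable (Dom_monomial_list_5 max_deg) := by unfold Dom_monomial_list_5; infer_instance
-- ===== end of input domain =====

-- B replaces A's five hand-unrolled nested loops by a recursive helper enumerating
-- nvars-tuples with a given sum (objective: simpler); identical list, identical order.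

-- ===== PORT A =====
def monomial_list_5 (max_deg : Int) : List (Int × Int × Int × Int × Int) :=
  (PySem.List.pyRange 0 (max_deg + 1) 1).foldl (fun monos d =>
    (PySem.List.pyRange 0 (d + 1) 1).foldl (fun monos a =>
      (PySem.List.pyRange 0 (d - a + 1) 1).foldl (fun monos c =>
        (PySem.List.pyRange 0 (d - a - c + 1) 1).foldl (fun monos i =>
          (PySem.List.pyRange 0 (d - a - c - i + 1) 1).foldl (fun monos j =>
            monos ++ [(a, c, i, j, d - a - c - i - j)]) monos) monos) monos) monos) []

-- ===== PORT B =====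
-- Python's varying-arity tuples are represented as List Int inside the recursion;
-- the top level converts each (always length-5) list to the 5-tuple with pvToTup5.
-- comps is only ever called with nvars ≥ 1 (the 0 case is unreachable, as in Python).
def pvComps : Nat → Int → List (List Int)
  | 0, _ => []
  | 1, total => [[total]]
  | (n + 2), total =>
      (PySem.List.pyRange 0 (total + 1) 1).foldl
        (fun out first => out ++ (pvComps (n + 1) (total - first)).map (fun rest => first :: rest)) []

def pvToTup5 : List Int → (Int × Int × Int × Int × Int)
  | [a, c, i, j, k] => (a, c, i, j, k)
  | _ => (0, 0, 0, 0, 0)  -- unreachable: pvComps 5 _ yields length-5 lists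

def monomial_list_5_alt (max_deg : Int) : List (Int × Int × Int × Int × Int) :=
  (PySem.List.pyRange 0 (max_deg + 1) 1).foldl
    (fun monos d => monos ++ (pvComps 5 d).map pvToTup5) []

-- ===== PRECONDITION & SPEC =====
def Spec_monomial_list_5 (max_deg : Int) (out : List (Int × Int × Int × Int × Int)) : Prop := out = monomial_list_5_alt max_deg
instance (max_deg : Int) (out : List (Int × Int × Int × Int × Int)) : Decidable (Spec_monomial_list_5 max_deg out) := by unfold Spec_monomial_list_5; infer_instance

-- ===== CLAIM (what is proved, stated in full; the proofs are below) =====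
def Claim_equal_monomial_list_5 : Prop := ∀ (max_deg : Int), Dom_monomial_list_5 max_deg → Spec_monomial_list_5 max_deg (monomial_list_5 max_deg)

-- ===== LEMMAS AND PROOFS =====

lemma pvComps_two (t : Int) :
    pvComps 2 t = (PySem.List.pyRange 0 (t + 1) 1).map (fun j => [j, t - j]) := by
  show (PySem.List.pyRange 0 (t + 1) 1).foldl
      (fun out first => out ++ [[first, t - first]]) [] = _
  simpa using PySem.List.foldl_append_singleton_eq_map
    (l := PySem.List.pyRange 0 (t + 1) 1) (f := fun j => [j, t - j]) (acc := [])

lemma pvComps_succ (n : Nat) (t : Int) :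
    pvComps (n + 2) t = (PySem.List.pyRange 0 (t + 1) 1).flatMap
      (fun f => (pvComps (n + 1) (t - f)).map (fun rest => f :: rest)) := by
  show (PySem.List.pyRange 0 (t + 1) 1).foldl
      (fun out first => out ++ (pvComps (n + 1) (t - first)).map (fun rest => first :: rest)) [] = _
  simpa using PySem.List.foldl_append_eq_flatMap
    (l := PySem.List.pyRange 0 (t + 1) 1)
    (g := fun f => (pvComps (n + 1) (t - f)).map (fun rest => f :: rest)) (acc := [])

lemma inner_loops_eq (d : Int) (monos : List (Int × Int × Int × Int × Int)) :
    (PySem.List.pyRange 0 (d + 1) 1).foldl (fun monos a =>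
      (PySem.List.pyRange 0 (d - a + 1) 1).foldl (fun monos c =>
        (PySem.List.pyRange 0 (d - a - c + 1) 1).foldl (fun monos i =>
          (PySem.List.pyRange 0 (d - a - c - i + 1) 1).foldl (fun monos j =>
            monos ++ [(a, c, i, j, d - a - c - i - j)]) monos) monos) monos) monos
    = monos ++ (pvComps 5 d).map pvToTup5 := by
  have h5 : ∀ t : Int, pvComps 5 t = (PySem.List.pyRange 0 (t + 1) 1).flatMap
      (fun f => (pvComps 4 (t - f)).map (fun rest => f :: rest)) := fun t => pvComps_succ 3 t
  have h4 : ∀ t : Int, pvComps 4 t = (PySem.List.pyRange 0 (t + 1) 1).flatMap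
      (fun f => (pvComps 3 (t - f)).map (fun rest => f :: rest)) := fun t => pvComps_succ 2 t
  have h3 : ∀ t : Int, pvComps 3 t = (PySem.List.pyRange 0 (t + 1) 1).flatMap
      (fun f => (pvComps 2 (t - f)).map (fun rest => f :: rest)) := fun t => pvComps_succ 1 t
  simp only [h5, h4, h3]
  simp only [pvComps_two, PySem.List.foldl_append_singleton_eq_map,
    PySem.List.foldl_append_eq_flatMap, List.map_flatMap, List.map_map, Function.comp_def, pvToTup5]

theorem monomial_list_5_spec : Claim_equal_monomial_list_5 := by
  intro max_deg _
  show monomial_list_5 max_deg = monomial_list_5_alt max_deg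
  unfold monomial_list_5 monomial_list_5_alt
  congr 1
  funext monos d
  exact inner_loops_eq d monos
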